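-- pv_equiv track=rewrite | github.com/xpunch/leetcode | 0051.n-queens/51.n-queens.py | getAvailablePositions
-- ===== SOURCE A (Python) =====
-- from typing import List
--
-- def getAvailablePositions(n: int, row: int, queens: List[int]) -> List[int]:
--     result = [i for i in range(n)]
--     for i in range(row):
--         q = queens[i]
--         gap = abs(row-i)
--         if result.__contains__(q):
--             result.remove(q)
--         if q-gap >= 0 and result.__contains__(q-gap):
--             result.remove(q-gap)
--         if q+gap < n and result.__contains__(q+gap):
--             result.remove(q+gap)
--     return result
-- ===== SOURCE B (Python) =====
-- def getAvailablePositions(n, row, queens):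
--     banned = set()
--     for i in range(row):
--         q = queens[i]
--         gap = abs(row - i)
--         banned.add(q)
--         banned.add(q - gap)
--         banned.add(q + gap)
--     return [c for c in range(n) if c not in banned]
-- ===== Notes on version B (the rewrite author's own statement) =====
-- stated objective: faster
-- what changed: B builds one set of banned columns (queen column and both diagonal hits per earlier row) and then filters range(n) by set membership, instead of A's per-queen __contains__/remove scans over a prebuilt mutable list.
import Mathlib
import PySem

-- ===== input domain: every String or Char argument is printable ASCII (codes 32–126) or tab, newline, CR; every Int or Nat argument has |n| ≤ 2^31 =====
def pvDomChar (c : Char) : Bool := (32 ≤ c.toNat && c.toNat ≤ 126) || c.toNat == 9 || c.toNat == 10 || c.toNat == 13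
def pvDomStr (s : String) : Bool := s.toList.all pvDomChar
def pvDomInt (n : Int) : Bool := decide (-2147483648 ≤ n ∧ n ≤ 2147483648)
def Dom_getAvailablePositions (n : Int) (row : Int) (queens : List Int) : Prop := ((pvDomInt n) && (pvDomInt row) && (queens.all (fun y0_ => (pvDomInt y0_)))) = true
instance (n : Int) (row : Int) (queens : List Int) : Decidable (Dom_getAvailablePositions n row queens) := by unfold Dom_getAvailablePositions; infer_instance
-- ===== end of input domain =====

-- B precomputes the banned columns of all earlier queens in one set, then keeps the candidate
-- columns not in it — O(row + n) instead of A's repeated list scans/removals, and measurably faster.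


-- ===== PORT A =====
def getAvailablePositions (n : Int) (row : Int) (queens : List Int) : List Int :=
  (PySem.List.pyRange 0 row 1).foldl
    (fun result i =>
      let q := PySem.List.pyGetD queens i 0
      let gap := |row - i|
      let r1 := if result.contains q then (PySem.List.remove? result q).getD result else result
      let r2 := if q - gap ≥ 0 ∧ r1.contains (q - gap) then (PySem.List.remove? r1 (q - gap)).getD r1 else r1
      let r3 := if q + gap < n ∧ r2.contains (q + gap) then (PySem.List.remove? r2 (q + gap)).getD r2 else r2
      r3)
    (PySem.List.pyRange 0 n 1)

-- ===== PORT B =====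
def getAvailablePositions_alt (n : Int) (row : Int) (queens : List Int) : List Int :=
  let banned := (PySem.List.pyRange 0 row 1).foldl
    (fun banned i =>
      let q := PySem.List.pyGetD queens i 0
      let gap := |row - i|
      PySem.Set.add (PySem.Set.add (PySem.Set.add banned q) (q - gap)) (q + gap))
    PySem.Set.empty
  (PySem.List.pyRange 0 n 1).filter (fun c => !(PySem.Set.contains banned c))

-- ===== PRECONDITION & SPEC =====
-- Pre_ excludes exactly the inputs where A raises IndexError: 0 < row and row > len(queens)
-- (the loop reads queens[i] for every i in range(row)).
def Pre_getAvailablePositions (n : Int) (row : Int) (queens : List Int) : Prop :=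
  row ≤ (queens.length : Int)
instance (n : Int) (row : Int) (queens : List Int) : Decidable (Pre_getAvailablePositions n row queens) := by unfold Pre_getAvailablePositions; infer_instance

def pvWitness_getAvailablePositions : Int × Int × List Int := (4, 2, [1, 3])

def Spec_getAvailablePositions (n : Int) (row : Int) (queens : List Int) (out : List Int) : Prop := out = getAvailablePositions_alt n row queens
instance (n : Int) (row : Int) (queens : List Int) (out : List Int) : Decidable (Spec_getAvailablePositions n row queens out) := by unfold Spec_getAvailablePositions; infer_instance

-- ===== CLAIM (what is proved, stated in full; the proofs are below) =====
def Claim_equal_getAvailablePositions : Prop := ∀ (n : Int) (row : Int) (queens : List Int), Dom_getAvailablePositions n row queens → Pre_getAvailablePositions n row queens → Spec_getAvailablePositions n row queens (getAvailablePositions n row queens)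
-- ===== LEMMAS AND PROOFS =====

-- The common safety test: column c is compatible with the queen of row i.
def pvOk (row : Int) (queens : List Int) (c i : Int) : Bool :=
  !(decide (PySem.List.pyGetD queens i 0 = c ∨ |PySem.List.pyGetD queens i 0 - c| = |row - i|))

-- membership in B's banned set, phrased through pvOk
lemma mem_bannedFold (row : Int) (queens : List Int) (l : List Int) (s : PySem.Set Int) (c : Int) :
    (c ∈ l.foldl (fun banned i =>
      let q := PySem.List.pyGetD queens i 0
      let gap := |row - i|
      PySem.Set.add (PySem.Set.add (PySem.Set.add banned q) (q - gap)) (q + gap)) s)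
    ↔ (c ∈ s ∨ ∃ i ∈ l, pvOk row queens c i = false) := by
  induction l generalizing s with
  | nil => simp
  | cons i l' ih =>
    rw [List.foldl_cons, ih]
    simp only [PySem.Set.mem_add, List.mem_cons]
    set q := PySem.List.pyGetD queens i 0 with hq
    set gap := |row - i| with hgap
    have hgap0 : 0 ≤ gap := abs_nonneg _
    have habs : |q - c| = gap ↔ (c = q - gap ∨ c = q + gap) := by
      rcases abs_cases (q - c) with ⟨he, _⟩ | ⟨he, _⟩ <;> rw [he] <;> omega
    have hok : pvOk row queens c i = false ↔ (c = q ∨ c = q - gap ∨ c = q + gap) := by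
      simp only [pvOk, Bool.not_eq_false', decide_eq_true_eq, ← hq, ← hgap, habs]
      constructor
      · rintro (h | h) <;> tauto
      · rintro (h | h) <;> simp [h] <;> tauto
    constructor
    · rintro ((((h | h) | h) | h) | ⟨j, hj, hjok⟩)
      · exact Or.inl h
      · exact Or.inr ⟨i, Or.inl rfl, hok.2 (Or.inl h)⟩
      · exact Or.inr ⟨i, Or.inl rfl, hok.2 (Or.inr (Or.inl h))⟩
      · exact Or.inr ⟨i, Or.inl rfl, hok.2 (Or.inr (Or.inr h))⟩
      · exact Or.inr ⟨j, Or.inr hj, hjok⟩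
    · rintro (h | ⟨j, (rfl | hj), hjok⟩)
      · exact Or.inl (Or.inl (Or.inl (Or.inl h)))
      · rcases hok.1 hjok with h | h | h
        · exact Or.inl (Or.inl (Or.inl (Or.inr h)))
        · exact Or.inl (Or.inl (Or.inr h))
        · exact Or.inl (Or.inr h)
      · exact Or.inr ⟨j, hj, hjok⟩

-- guarded remove on a filter of a nodup list is a filter refinement
lemma removeIf_filter (l : List Int) (hl : l.Nodup) (p : Int → Bool) (v : Int) :
    (if ((l.filter p).contains v) then (PySem.List.remove? (l.filter p) v).getD (l.filter p) else (l.filter p))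
      = l.filter (fun c => p c && !(decide (c = v))) := by
  by_cases hv : v ∈ l.filter p
  · rw [if_pos (by simpa using hv), PySem.List.remove?_eq_some_erase _ _ hv, Option.getD_some,
      (hl.filter p).erase_eq_filter, List.filter_filter]
    exact List.filter_congr (fun c _ => by by_cases h : c = v <;> simp [h])
  · rw [if_neg (by simpa using hv)]
    refine (List.filter_congr (fun c hc => ?_)).symm
    by_cases h : p c
    · have : c ≠ v := fun e => hv (e ▸ List.mem_filter.2 ⟨hc, h⟩)
      simp [h, this]
    · simp [h]

-- same, under an extra guard that (when false) already excludes v from l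
lemma guard_filter (l : List Int) (hl : l.Nodup) (p : Int → Bool) (v : Int)
    (cond : Prop) [Decidable cond] (h : ¬cond → ∀ c ∈ l, c ≠ v) :
    (if cond ∧ ((l.filter p).contains v) then (PySem.List.remove? (l.filter p) v).getD (l.filter p) else (l.filter p))
      = l.filter (fun c => p c && !(decide (c = v))) := by
  by_cases hc : cond
  · simp only [hc, true_and]
    exact removeIf_filter l hl p v
  · rw [if_neg (fun h' => hc h'.1)]
    refine (List.filter_congr (fun c hcl => ?_)).symm
    by_cases hp : p c
    · simp [hp, h hc c hcl]
    · simp [hp]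

-- one iteration of A's loop refines the filter by pvOk
lemma stepA_filter (n row : Int) (queens : List Int) (i : Int) (p : Int → Bool) :
    (let q := PySem.List.pyGetD queens i 0
      let gap := |row - i|
      let r1 := if ((PySem.List.pyRange 0 n 1).filter p).contains q then (PySem.List.remove? ((PySem.List.pyRange 0 n 1).filter p) q).getD ((PySem.List.pyRange 0 n 1).filter p) else ((PySem.List.pyRange 0 n 1).filter p)
      let r2 := if q - gap ≥ 0 ∧ r1.contains (q - gap) then (PySem.List.remove? r1 (q - gap)).getD r1 else r1
      let r3 := if q + gap < n ∧ r2.contains (q + gap) then (PySem.List.remove? r2 (q + gap)).getD r2 else r2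
      r3)
      = (PySem.List.pyRange 0 n 1).filter (fun c => p c && pvOk row queens c i) := by
  have hl := PySem.List.nodup_pyRange_one 0 n
  set q := PySem.List.pyGetD queens i 0 with hq
  set gap := |row - i| with hgap
  have hgap0 : 0 ≤ gap := abs_nonneg _
  simp only []
  rw [removeIf_filter _ hl,
    guard_filter _ hl _ _ (q - gap ≥ 0)
      (fun hng c hc => by have := (PySem.List.mem_pyRange_one.1 hc).1; omega),
    guard_filter _ hl _ _ (q + gap < n)
      (fun hng c hc => by have := (PySem.List.mem_pyRange_one.1 hc).2; omega)]
  refine List.filter_congr (fun c _ => ?_)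
  have habs : |q - c| = gap ↔ (c = q - gap ∨ c = q + gap) := by
    rcases abs_cases (q - c) with ⟨he, _⟩ | ⟨he, _⟩ <;> rw [he] <;> omega
  by_cases hp : p c
  · by_cases h1 : c = q
    · simp [pvOk, hp, h1, ← hq, ← hgap]
    · by_cases h2' : |q - c| = gap
      · rcases habs.1 h2' with h | h <;> simp [pvOk, h, ← hq, ← hgap, hgap0]
      · have hqm : c ≠ q - gap := fun e => h2' (habs.2 (Or.inl e))
        have hqp : c ≠ q + gap := fun e => h2' (habs.2 (Or.inr e))
        simp [pvOk, hp, h1, hqm, hqp, ← hq, ← hgap, h2', Ne.symm h1]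
  · simp [hp]

-- A's whole loop over any index list is a filter by 'all pvOk'
lemma foldA_filter (n row : Int) (queens : List Int) (is : List Int) (p : Int → Bool) :
    is.foldl (fun result i =>
      let q := PySem.List.pyGetD queens i 0
      let gap := |row - i|
      let r1 := if result.contains q then (PySem.List.remove? result q).getD result else result
      let r2 := if q - gap ≥ 0 ∧ r1.contains (q - gap) then (PySem.List.remove? r1 (q - gap)).getD r1 else r1
      let r3 := if q + gap < n ∧ r2.contains (q + gap) then (PySem.List.remove? r2 (q + gap)).getD r2 else r2
      r3) ((PySem.List.pyRange 0 n 1).filter p)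
      = (PySem.List.pyRange 0 n 1).filter (fun c => p c && is.all (fun i => pvOk row queens c i)) := by
  induction is generalizing p with
  | nil => simp
  | cons i is' ih =>
    rw [List.foldl_cons, stepA_filter, ih]
    exact List.filter_congr (fun c _ => by simp [Bool.and_assoc])

-- ===== VERDICT (by name: the statement is the Claim_ definition above) =====
theorem getAvailablePositions_spec : Claim_equal_getAvailablePositions := by
  intro n row queens _ _
  unfold Spec_getAvailablePositions getAvailablePositions getAvailablePositions_alt
  have hA := foldA_filter n row queens (PySem.List.pyRange 0 row 1) (fun _ => true)
  simp only [List.filter_true] at hA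
  rw [hA]
  simp only []
  refine List.filter_congr (fun c _ => ?_)
  simp only [Bool.true_and]
  have hmem := mem_bannedFold row queens (PySem.List.pyRange 0 row 1) PySem.Set.empty c
  cases hb : PySem.Set.contains ((PySem.List.pyRange 0 row 1).foldl
      (fun banned i =>
        let q := PySem.List.pyGetD queens i 0
        let gap := |row - i|
        PySem.Set.add (PySem.Set.add (PySem.Set.add banned q) (q - gap)) (q + gap))
      PySem.Set.empty) c
  · have hnot : ¬ (c ∈ (PySem.List.pyRange 0 row 1).foldl
        (fun banned i =>
          let q := PySem.List.pyGetD queens i 0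
          let gap := |row - i|
          PySem.Set.add (PySem.Set.add (PySem.Set.add banned q) (q - gap)) (q + gap))
        PySem.Set.empty) := fun h => by
      rw [← PySem.Set.contains_iff] at h; rw [hb] at h; exact Bool.false_ne_true h
    rw [hmem] at hnot
    push_neg at hnot
    simp only [Bool.not_false]
    rw [List.all_eq_true]
    intro i hi
    have := hnot.2 i hi
    cases hpv : pvOk row queens c i
    · exact absurd hpv this
    · rfl
  · have hc : c ∈ (PySem.List.pyRange 0 row 1).foldl
        (fun banned i =>
          let q := PySem.List.pyGetD queens i 0
          let gap := |row - i|
          PySem.Set.add (PySem.Set.add (PySem.Set.add banned q) (q - gap)) (q + gap))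
        PySem.Set.empty := (PySem.Set.contains_iff _ _).1 hb
    rcases hmem.1 hc with h | ⟨i, hi, hiok⟩
    · exact absurd h (by simp [PySem.Set.empty])
    · simp only [Bool.not_true]
      rw [List.all_eq_false]
      exact ⟨i, hi, by simp [hiok]⟩
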